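-- pv_equiv track=rewrite | github.com/GeorgeKovshov/codewars2 | codewars9.py | alphabet_war3
-- ===== SOURCE A (Python) =====
-- def alphabet_war3(reinforces, airstrikes):
--     depth = len(airstrikes)
--     length = 0
--     for x in airstrikes:
--         length = len(x) if len(x) > length else length
--     bombings = [0] * length
--     i = 0
--     while i < depth:
--         for j in range(0, len(airstrikes[i])):
--             if airstrikes[i][j] == '*':
--                 if j == 0 or airstrikes[i][j - 1] != '*':
--                     bombings[j] += 1
--                 if j < length - 1:
--                     bombings[j + 1] += 1
--         i += 1
--
--     result = []
--     for j in range(length):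
--         result.append(reinforces[bombings[j]][j])
--     return "".join(result)
-- ===== SOURCE B (Python) =====
-- def alphabet_war3(reinforces, airstrikes):
--     # Loop-interchanged rewrite: instead of accumulating a bombings array by
--     # scanning every airstrike, compute each position's hit count directly by
--     # counting run-starts and star-left-neighbours across the airstrikes.
--     length = max(map(len, airstrikes), default=0)
--
--     def hits(j):
--         starts = sum(1 for x in airstrikes
--                      if j < len(x) and x[j] == '*' and (j == 0 or x[j - 1] != '*'))
--         spread = sum(1 for x in airstrikes
--                      if 1 <= j <= len(x) and x[j - 1] == '*')
--         return starts + spread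
--
--     return ''.join(reinforces[hits(j)][j] for j in range(length))
-- ===== Notes on version B (the rewrite author's own statement) =====
-- stated objective: simpler
-- what changed: B interchanges the loops: instead of accumulating a mutable bombings array by scanning every airstrike character with run-start checks, it computes each surviving position's hit count directly as two counts over the airstrikes (run-start at j, star at j-1), with no intermediate array.
import Mathlib
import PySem

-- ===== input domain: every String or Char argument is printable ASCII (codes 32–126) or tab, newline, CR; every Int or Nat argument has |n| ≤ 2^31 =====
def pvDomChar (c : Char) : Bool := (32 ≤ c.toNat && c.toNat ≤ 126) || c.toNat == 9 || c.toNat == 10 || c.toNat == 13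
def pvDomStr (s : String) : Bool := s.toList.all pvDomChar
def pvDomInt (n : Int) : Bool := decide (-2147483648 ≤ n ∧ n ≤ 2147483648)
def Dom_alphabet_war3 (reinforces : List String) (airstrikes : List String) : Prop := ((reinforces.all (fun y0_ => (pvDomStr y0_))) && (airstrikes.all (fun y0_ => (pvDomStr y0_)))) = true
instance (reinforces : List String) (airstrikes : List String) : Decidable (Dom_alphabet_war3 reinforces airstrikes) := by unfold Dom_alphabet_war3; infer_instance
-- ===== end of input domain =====

-- B replaces A's per-airstrike accumulation into a mutable bombings array by a
-- loop-interchanged direct count of hits per surviving position (objective: simpler).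

-- ===== PORT A =====
-- Strings are handled via String.toList; indexing inside the scan loops is
-- always in range (j < len x ≤ length), so List.getD is exact there; the final
-- reinforces[...][...] lookups raise IndexError in Python exactly outside
-- Pre_alphabet_war3 below.
-- body of A's inner 'for j in range(len(x))' loop, for one airstrike x
def pvScan (L : Nat) (x : List Char) (bs : List Nat) (j : Nat) : List Nat :=
  if x.getD j ' ' = '*' then
    let bs1 := if j = 0 ∨ ¬ x.getD (j - 1) ' ' = '*' then bs.modify j (· + 1) else bs
    if j < L - 1 then bs1.modify (j + 1) (· + 1) else bs1
  else bs

-- the whole inner loop for one airstrike x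
def pvStepA (L : Nat) (bs : List Nat) (x : List Char) : List Nat :=
  (List.range x.length).foldl (pvScan L x) bs

def alphabet_war3 (reinforces : List String) (airstrikes : List String) : String :=
  let as := airstrikes.map String.toList
  let length := as.foldl (fun len x => if len < x.length then x.length else len) 0
  -- 'while i < depth' over airstrikes[i] = left fold over the list
  let bombings := as.foldl (pvStepA length) (List.replicate length 0)
  String.mk ((List.range length).foldl
    (fun r j => r ++ [(reinforces.getD (bombings.getD j 0) "").toList.getD j ' ']) [])

-- ===== PORT B =====
-- Source B's two generator-sum counts for position j
def pvHit1 (x : List Char) (j : Nat) : Bool :=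
  decide (j < x.length) && decide (x.getD j ' ' = '*') &&
    (decide (j = 0) || decide (¬ x.getD (j - 1) ' ' = '*'))

def pvHit2 (x : List Char) (j : Nat) : Bool :=
  decide (1 ≤ j) && decide (j ≤ x.length) && decide (x.getD (j - 1) ' ' = '*')

def pvHits (airs : List (List Char)) (j : Nat) : Nat :=
  airs.countP (fun x => pvHit1 x j) + airs.countP (fun x => pvHit2 x j)

def alphabet_war3_alt (reinforces : List String) (airstrikes : List String) : String :=
  let as := airstrikes.map String.toList
  let length := (as.map List.length).foldl Nat.max 0
  String.mk ((List.range length).map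
    (fun j => (reinforces.getD (pvHits as j) "").toList.getD j ' '))

-- ===== PRECONDITION & SPEC =====
-- independent copy of the hit count, so that Pre_'s closure reaches no port
def pvPreHits (airs : List (List Char)) (j : Nat) : Nat :=
  airs.countP (fun x => decide (j < x.length) && decide (x.getD j ' ' = '*') &&
    (decide (j = 0) || decide (¬ x.getD (j - 1) ' ' = '*'))) +
  airs.countP (fun x => decide (1 ≤ j) && decide (j ≤ x.length) &&
    decide (x.getD (j - 1) ' ' = '*'))

-- Pre_ excludes exactly the inputs where A raises IndexError: some surviving
-- position j for which the double lookup reinforces[hits(j)][j] is out of range.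
def Pre_alphabet_war3 (reinforces : List String) (airstrikes : List String) : Prop :=
  ∀ j, j < (((airstrikes.map String.toList).map List.length).foldl Nat.max 0) →
    pvPreHits (airstrikes.map String.toList) j < reinforces.length ∧
    j < (reinforces.getD (pvPreHits (airstrikes.map String.toList) j) "").toList.length

instance (reinforces : List String) (airstrikes : List String) : Decidable (Pre_alphabet_war3 reinforces airstrikes) := by unfold Pre_alphabet_war3; infer_instance

def pvWitness_alphabet_war3 : List String × List String := (["ab", "cd"], ["*b"])

def Spec_alphabet_war3 (reinforces : List String) (airstrikes : List String) (out : String) : Prop := out = alphabet_war3_alt reinforces airstrikes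
instance (reinforces : List String) (airstrikes : List String) (out : String) : Decidable (Spec_alphabet_war3 reinforces airstrikes out) := by unfold Spec_alphabet_war3; infer_instance

-- ===== CLAIM (what is proved, stated in full; the proofs are below) =====
def Claim_equal_alphabet_war3 : Prop := ∀ (reinforces : List String) (airstrikes : List String), Dom_alphabet_war3 reinforces airstrikes → Pre_alphabet_war3 reinforces airstrikes → Spec_alphabet_war3 reinforces airstrikes (alphabet_war3 reinforces airstrikes)

-- ===== LEMMAS AND PROOFS =====

-- A's running-max loop computes the fold of Nat.max over the lengths
theorem pv_len_fold (as : List (List Char)) :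
    ∀ a : Nat, as.foldl (fun len x => if len < x.length then x.length else len) a
      = (as.map List.length).foldl Nat.max a := by
  induction as with
  | nil => intro a; rfl
  | cons x as ih =>
    intro a
    simp only [List.foldl_cons, List.map_cons, ih]
    congr 1
    by_cases h : a < x.length
    · simp [h, Nat.max_eq_right (le_of_lt h)]
    · simp [h, Nat.max_eq_left (by omega : x.length ≤ a)]

theorem pv_le_fold_max (l : List Nat) : ∀ a : Nat,
    a ≤ l.foldl Nat.max a ∧ ∀ x ∈ l, x ≤ l.foldl Nat.max a := by
  induction l with
  | nil => intro a; simp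
  | cons y l ih =>
    intro a
    simp only [List.foldl_cons]
    refine ⟨le_trans (Nat.le_max_left a y) (ih (Nat.max a y)).1, ?_⟩
    intro x hx
    rcases List.mem_cons.mp hx with rfl | h
    · exact le_trans (Nat.le_max_right a x) (ih (Nat.max a x)).1
    · exact (ih (Nat.max a y)).2 x h

theorem pv_getD_modify (bs : List Nat) (i j : Nat) :
    (bs.modify i (· + 1)).getD j 0
      = if i = j ∧ j < bs.length then bs.getD j 0 + 1 else bs.getD j 0 := by
  rw [List.getD_eq_getElem?_getD, List.getD_eq_getElem?_getD, List.getElem?_modify]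
  by_cases hj : j < bs.length
  · rw [List.getElem?_eq_getElem hj]
    by_cases hij : i = j <;> simp [hij, hj]
  · rw [List.getElem?_eq_none (by omega)]
    simp [hj]

theorem pv_scan_fold_length (L : Nat) (x : List Char) (l : List Nat) :
    ∀ bs : List Nat, (l.foldl (pvScan L x) bs).length = bs.length := by
  induction l with
  | nil => intro bs; rfl
  | cons j l ih =>
    intro bs
    simp only [List.foldl_cons, ih]
    unfold pvScan
    split_ifs <;> simp [List.length_modify]

theorem pv_ind_true {P : Prop} [Decidable P] (hp : P) : (if P then (1 : Nat) else 0) = 1 :=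
  if_pos hp

theorem pv_ind_false {P : Prop} [Decidable P] (hp : ¬P) : (if P then (1 : Nat) else 0) = 0 :=
  if_neg hp

theorem pv_ind_and_true {P Q : Prop} [Decidable P] [Decidable Q] (hq : Q) :
    (if P ∧ Q then (1 : Nat) else 0) = if P then 1 else 0 := by
  by_cases hp : P <;> simp [hp, hq]

theorem pv_ind_and_false {P Q : Prop} [Decidable P] [Decidable Q] (hq : ¬Q) :
    (if P ∧ Q then (1 : Nat) else 0) = 0 := by
  simp [hq]

theorem pv_getD_modify_ne (bs : List Nat) {i j : Nat} (h : ¬ i = j) :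
    (bs.modify i (· + 1)).getD j 0 = bs.getD j 0 := by
  rw [pv_getD_modify, if_neg]
  rintro ⟨h', _⟩
  exact h h'

theorem pv_getD_modify_self (bs : List Nat) {i j : Nat} (h : i = j) (hlen : j < bs.length) :
    (bs.modify i (· + 1)).getD j 0 = bs.getD j 0 + 1 := by
  rw [pv_getD_modify, if_pos ⟨h, hlen⟩]

-- pointwise effect of processing the first n positions of one airstrike x
theorem pv_scan_prefix (L : Nat) (x : List Char) (j : Nat) (hjL : j < L)
    (hxL : x.length ≤ L) :
    ∀ n, n ≤ x.length → ∀ bs : List Nat, bs.length = L →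
    ((List.range n).foldl (pvScan L x) bs).getD j 0
      = bs.getD j 0 + (if pvHit1 x j = true ∧ j < n then 1 else 0)
          + (if pvHit2 x j = true ∧ j ≤ n then 1 else 0) := by
  intro n
  induction n with
  | zero =>
    intro _ bs _
    have h1 : ¬ (pvHit1 x j = true ∧ j < 0) := by rintro ⟨_, hj0⟩; omega
    have h2 : ¬ (pvHit2 x j = true ∧ j ≤ 0) := by
      rintro ⟨h, hj0⟩
      simp [pvHit2] at h
      omega
    simp only [List.range_zero, List.foldl_nil, if_neg h1, if_neg h2]
    omega
  | succ n ih =>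
    intro hn bs hbs
    have hn' : n ≤ x.length := by omega
    have hnx : n < x.length := by omega
    rw [List.range_succ, List.foldl_append, List.foldl_cons, List.foldl_nil]
    have hBlen : ((List.range n).foldl (pvScan L x) bs).length = L :=
      (pv_scan_fold_length L x (List.range n) bs).trans hbs
    have hBv := ih hn' bs hbs
    set B := (List.range n).foldl (pvScan L x) bs with hB
    by_cases hjn : j = n
    · subst hjn
      rw [pv_ind_and_false (lt_irrefl j), pv_ind_and_true (le_refl j)] at hBv
      rw [pv_ind_and_true (Nat.lt_succ_self j), pv_ind_and_true (Nat.le_succ j)]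
      unfold pvScan
      by_cases hs : x.getD j ' ' = '*'
      · rw [if_pos hs]
        by_cases hc : j = 0 ∨ ¬x.getD (j - 1) ' ' = '*'
        · have h1 : pvHit1 x j = true := by
            simp only [pvHit1, Bool.and_eq_true, Bool.or_eq_true, decide_eq_true_eq]
            exact ⟨⟨hnx, hs⟩, by tauto⟩
          rw [if_pos hc, pv_ind_true h1]
          by_cases hL : j < L - 1
          · rw [if_pos hL, pv_getD_modify_ne _ (by omega),
              pv_getD_modify_self _ rfl (by rw [hBlen]; exact hjL)]
            omega
          · rw [if_neg hL, pv_getD_modify_self _ rfl (by rw [hBlen]; exact hjL)]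
            omega
        · have h1 : ¬ pvHit1 x j = true := by
            simp only [pvHit1, Bool.and_eq_true, Bool.or_eq_true, decide_eq_true_eq]
            rintro ⟨⟨-, -⟩, h | h⟩
            · exact hc (Or.inl h)
            · exact hc (Or.inr h)
          rw [if_neg hc, pv_ind_false h1]
          by_cases hL : j < L - 1
          · rw [if_pos hL, pv_getD_modify_ne _ (by omega)]
            omega
          · rw [if_neg hL]
            omega
      · have h1 : ¬ pvHit1 x j = true := by
          simp only [pvHit1, Bool.and_eq_true, Bool.or_eq_true, decide_eq_true_eq]
          rintro ⟨⟨-, h⟩, -⟩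
          exact hs h
        rw [if_neg hs, pv_ind_false h1]
        omega
    · by_cases hjn1 : j = n + 1
      · subst hjn1
        rw [pv_ind_and_false (by omega : ¬ n + 1 < n), pv_ind_and_false (by omega : ¬ n + 1 ≤ n)] at hBv
        rw [pv_ind_and_false (by omega : ¬ n + 1 < n + 1), pv_ind_and_true (le_refl (n + 1))]
        unfold pvScan
        by_cases hs : x.getD n ' ' = '*'
        · have h2 : pvHit2 x (n + 1) = true := by
            simp only [pvHit2, Bool.and_eq_true, decide_eq_true_eq, Nat.add_sub_cancel]
            exact ⟨⟨by omega, by omega⟩, hs⟩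
          rw [if_pos hs, pv_ind_true h2]
          have hL : n < L - 1 := by omega
          rw [if_pos hL]
          by_cases hc : n = 0 ∨ ¬x.getD (n - 1) ' ' = '*'
          · rw [if_pos hc,
              pv_getD_modify_self _ rfl (by rw [List.length_modify, hBlen]; exact hjL),
              pv_getD_modify_ne _ (by omega)]
            omega
          · rw [if_neg hc, pv_getD_modify_self _ rfl (by rw [hBlen]; exact hjL)]
            omega
        · have h2 : ¬ pvHit2 x (n + 1) = true := by
            simp only [pvHit2, Bool.and_eq_true, decide_eq_true_eq, Nat.add_sub_cancel]
            rintro ⟨⟨-, -⟩, h⟩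
            exact hs h
          rw [if_neg hs, pv_ind_false h2]
          omega
      · have c1 : (if pvHit1 x j = true ∧ j < n + 1 then (1 : Nat) else 0)
            = if pvHit1 x j = true ∧ j < n then 1 else 0 :=
          if_congr (by constructor <;> rintro ⟨a, b⟩ <;> exact ⟨a, by omega⟩) rfl rfl
        have c2 : (if pvHit2 x j = true ∧ j ≤ n + 1 then (1 : Nat) else 0)
            = if pvHit2 x j = true ∧ j ≤ n then 1 else 0 :=
          if_congr (by constructor <;> rintro ⟨a, b⟩ <;> exact ⟨a, by omega⟩) rfl rfl
        rw [c1, c2]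
        unfold pvScan
        by_cases hs : x.getD n ' ' = '*'
        · by_cases hc : n = 0 ∨ ¬x.getD (n - 1) ' ' = '*'
          · by_cases hL : n < L - 1
            · rw [if_pos hs, if_pos hc, if_pos hL, pv_getD_modify_ne _ (by omega),
                pv_getD_modify_ne _ (by omega)]
              omega
            · rw [if_pos hs, if_pos hc, if_neg hL, pv_getD_modify_ne _ (by omega)]
              omega
          · by_cases hL : n < L - 1
            · rw [if_pos hs, if_neg hc, if_pos hL, pv_getD_modify_ne _ (by omega)]
              omega
            · rw [if_pos hs, if_neg hc, if_neg hL]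
              omega
        · rw [if_neg hs]
          omega

-- the whole inner loop for one airstrike adds the two hit indicators at each position
theorem pv_stepA_eq (L : Nat) (x : List Char) (hxL : x.length ≤ L) (bs : List Nat)
    (hbs : bs.length = L) (j : Nat) (hj : j < L) :
    (pvStepA L bs x).getD j 0
      = bs.getD j 0 + (if pvHit1 x j = true then 1 else 0)
          + (if pvHit2 x j = true then 1 else 0) := by
  unfold pvStepA
  rw [pv_scan_prefix L x j hj hxL x.length (le_refl _) bs hbs]
  have a1 : (pvHit1 x j = true ∧ j < x.length) ↔ pvHit1 x j = true := by
    refine ⟨And.left, fun h => ⟨h, ?_⟩⟩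
    simp only [pvHit1, Bool.and_eq_true, decide_eq_true_eq] at h
    exact h.1.1
  have a2 : (pvHit2 x j = true ∧ j ≤ x.length) ↔ pvHit2 x j = true := by
    refine ⟨And.left, fun h => ⟨h, ?_⟩⟩
    simp only [pvHit2, Bool.and_eq_true, decide_eq_true_eq] at h
    exact h.1.2
  rw [if_congr a1 rfl rfl, if_congr a2 rfl rfl]

-- A's bombings accumulation computes B's per-position hit count
theorem pv_bombs (L : Nat) (j : Nat) (hj : j < L) :
    ∀ (as : List (List Char)), (∀ x ∈ as, x.length ≤ L) → ∀ bs : List Nat, bs.length = L →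
      (as.foldl (pvStepA L) bs).length = L ∧
      (as.foldl (pvStepA L) bs).getD j 0 = bs.getD j 0 + pvHits as j := by
  intro as
  induction as with
  | nil => intro _ bs hbs; exact ⟨hbs, by simp [pvHits]⟩
  | cons x as ih =>
    intro hall bs hbs
    simp only [List.foldl_cons]
    have hx : x.length ≤ L := hall x (by simp)
    have hlen : (pvStepA L bs x).length = L := by
      unfold pvStepA; rw [pv_scan_fold_length]; exact hbs
    obtain ⟨hl, hv⟩ := ih (fun y hy => hall y (by simp [hy])) (pvStepA L bs x) hlen
    refine ⟨hl, ?_⟩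
    rw [hv, pv_stepA_eq L x hx bs hbs j hj]
    simp only [pvHits, List.countP_cons]
    omega

-- A's back-append result loop is a map
theorem pv_foldl_append_map (g : Nat → Char) (l : List Nat) : ∀ acc : List Char,
    l.foldl (fun r j => r ++ [g j]) acc = acc ++ l.map g := by
  induction l with
  | nil => intro acc; simp
  | cons j l ih => intro acc; simp [ih]

theorem alphabet_war3_spec : Claim_equal_alphabet_war3 := by
  intro reinforces airstrikes _ _
  show alphabet_war3 reinforces airstrikes = alphabet_war3_alt reinforces airstrikes
  simp only [alphabet_war3, alphabet_war3_alt]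
  rw [pv_len_fold]
  rw [pv_foldl_append_map]
  simp only [List.nil_append]
  congr 1
  apply List.map_congr_left
  intro j hj
  have hjL : j < (((airstrikes.map String.toList).map List.length).foldl Nat.max 0) :=
    List.mem_range.mp hj
  have hall : ∀ x ∈ airstrikes.map String.toList,
      x.length ≤ (((airstrikes.map String.toList).map List.length).foldl Nat.max 0) := by
    intro x hx
    exact (pv_le_fold_max ((airstrikes.map String.toList).map List.length) 0).2 x.length
      (List.mem_map_of_mem hx)
  obtain ⟨-, hv⟩ := pv_bombs _ j hjL (airstrikes.map String.toList) hall
    (List.replicate (((airstrikes.map String.toList).map List.length).foldl Nat.max 0) 0)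
    (by rw [List.length_replicate])
  have hz : (List.replicate (((airstrikes.map String.toList).map List.length).foldl Nat.max 0)
      (0 : Nat)).getD j 0 = 0 := by
    rw [List.getD_eq_getElem?_getD, List.getElem?_replicate, if_pos hjL]
    rfl
  rw [hv, hz, Nat.zero_add]
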